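-- pv_equiv track=rewrite | github.com/tatargabor/hu-it-layoffs | src/visualize.py | _count_events
-- ===== SOURCE A (Python) =====
-- def _count_events(posts):
--     """Count unique events. Posts with same event_label count as 1."""
--     labels = set()
--     count = 0
--     for p in posts:
--         label = p.get('llm_event_label')
--         if label:
--             if label not in labels:
--                 labels.add(label)
--                 count += 1
--         else:
--             count += 1
--     return count
-- ===== SOURCE B (Python) =====
-- def _count_events(posts):
--     """Count unique events. Posts with same event_label count as 1."""
--     labels = [p.get('llm_event_label') for p in posts]
--     events = sorted(l for l in labels if l)
--     distinct = 0
--     prev = None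
--     for l in events:
--         if l != prev:
--             distinct += 1
--             prev = l
--     return distinct + sum(1 for l in labels if not l)
-- ===== Notes on version B (the rewrite author's own statement) =====
-- stated objective: alternative
-- what changed: Replaces A's hash-set membership test with a running count by a collect-sort-scan pipeline: gather the labels in one pass over posts, sort the truthy ones so duplicates are adjacent, count boundary changes for the distinct total, and add the count of falsy labels.
import Mathlib
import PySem

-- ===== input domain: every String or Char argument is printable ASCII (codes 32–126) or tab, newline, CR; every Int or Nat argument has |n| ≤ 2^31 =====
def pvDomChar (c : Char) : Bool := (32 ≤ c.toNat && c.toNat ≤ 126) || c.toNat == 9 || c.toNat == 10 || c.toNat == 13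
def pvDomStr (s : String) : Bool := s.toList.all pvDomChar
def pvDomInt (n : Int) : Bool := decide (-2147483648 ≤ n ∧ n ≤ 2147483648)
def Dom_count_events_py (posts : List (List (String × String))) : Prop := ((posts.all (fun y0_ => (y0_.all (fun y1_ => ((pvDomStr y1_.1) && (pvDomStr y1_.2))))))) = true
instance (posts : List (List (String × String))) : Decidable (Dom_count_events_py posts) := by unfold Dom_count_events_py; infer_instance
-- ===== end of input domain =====

-- B replaces A's single-pass hash-set counting by a collect-sort-scan pipeline: gather the labels,
-- sort the truthy ones so equal labels are adjacent, count boundary changes, add falsy-label count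
-- (objective: alternative; not faster).

-- ===== PORT A =====
-- loop body of A: label = p.get('llm_event_label'); if label: (if new: add, count+=1) else count+=1
def count_events_step (st : PySem.Set String × Int) (p : List (String × String)) :
    PySem.Set String × Int :=
  match PySem.Dict.get? (PySem.Dict.mk p) "llm_event_label" with
  | some l =>
      if l ≠ "" then
        if PySem.Set.contains st.1 l then st else (PySem.Set.add st.1 l, st.2 + 1)
      else (st.1, st.2 + 1)
  | none => (st.1, st.2 + 1)

def count_events_py (posts : List (List (String × String))) : Int :=
  (posts.foldl count_events_step (PySem.Set.empty, 0)).2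

-- ===== PORT B =====
-- l is truthy iff it is a non-empty string (not None, not "")
def count_events_truthy? (o : Option String) : Option String :=
  match o with
  | some l => if l = "" then none else some l
  | none => none

-- loop body of B's scan over the sorted labels: if l != prev: distinct += 1; prev = l
def count_events_scan_step (st : Int × Option String) (l : String) : Int × Option String :=
  if some l ≠ st.2 then (st.1 + 1, some l) else st

def count_events_py_alt (posts : List (List (String × String))) : Int :=
  let labels := posts.map (fun p => PySem.Dict.get? (PySem.Dict.mk p) "llm_event_label")
  let events := PySem.List.sorted (labels.filterMap count_events_truthy?) (fun x => x) false
  let distinct := (events.foldl count_events_scan_step ((0 : Int), (none : Option String))).1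
  distinct + (labels.countP (fun o => (count_events_truthy? o).isNone) : Int)

-- ===== PRECONDITION & SPEC =====
def Spec_count_events_py (posts : List (List (String × String))) (out : Int) : Prop := out = count_events_py_alt posts
instance (posts : List (List (String × String))) (out : Int) : Decidable (Spec_count_events_py posts out) := by unfold Spec_count_events_py; infer_instance

-- ===== CLAIM (what is proved, stated in full; the proofs are below) =====
def Claim_equal_count_events_py : Prop := ∀ (posts : List (List (String × String))), Dom_count_events_py posts → Spec_count_events_py posts (count_events_py posts)

-- ===== LEMMAS AND PROOFS =====

-- proof-only intermediate step: add each truthy label to the set, count falsy posts separately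
def count_events_mid_step (st : PySem.Set String × Int) (p : List (String × String)) :
    PySem.Set String × Int :=
  match PySem.Dict.get? (PySem.Dict.mk p) "llm_event_label" with
  | some l =>
      if l ≠ "" then (PySem.Set.add st.1 l, st.2)
      else (st.1, st.2 + 1)
  | none => (st.1, st.2 + 1)

-- invariant: starting A's fold at count = |s| + u and the mid fold at (s, u), A's final state is
-- invariant: starting A's fold at count = |s| + u and the intermediate fold at (s, u), A's final
-- state is the intermediate fold's final set together with |finalSet| + finalUnlabeled
theorem count_events_fold_inv (posts : List (List (String × String)))
    (s : PySem.Set String) (u : Int) :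
    posts.foldl count_events_step (s, (s.length : Int) + u)
      = ((posts.foldl count_events_mid_step (s, u)).1,
         (((posts.foldl count_events_mid_step (s, u)).1.length : Int)
           + (posts.foldl count_events_mid_step (s, u)).2)) := by
  induction posts generalizing s u with
  | nil => simp
  | cons p rest ih =>
    simp only [List.foldl_cons]
    rcases hget : PySem.Dict.get? (PySem.Dict.mk p) "llm_event_label" with _ | l
    · simpa [count_events_step, count_events_mid_step, hget,
        add_assoc] using ih s (u + 1)
    · by_cases hl : l = ""
      · simpa [count_events_step, count_events_mid_step, hget, hl,
          add_assoc] using ih s (u + 1)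
      · by_cases hc : PySem.Set.contains s l
        · have hm : l ∈ s := by simpa using hc
          have hadd : PySem.Set.add s l = s := by
            simp [PySem.Set.add, hm]
          simpa [count_events_step, count_events_mid_step, hget, hl, hm, hadd]
            using ih s u
        · have hm : l ∉ s := by simpa using hc
          have hadd : PySem.Set.add s l = s ++ [l] := by
            simp [PySem.Set.add, hm]
          have hlen : ((s.length : Int) + u) + 1 = (((PySem.Set.add s l).length : Int) + u) := by
            rw [hadd]; push_cast [List.length_append, List.length_cons, List.length_nil]; ring
          simp only [count_events_step, count_events_mid_step, hget]
          rw [if_pos hl, if_neg hc, if_pos hl, hlen]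
          exact ih (PySem.Set.add s l) u

-- the mid fold's set is the Set-fold over the truthy labels, its counter counts the falsy labels
theorem count_events_mid_char (posts : List (List (String × String)))
    (s : PySem.Set String) (u : Int) :
    posts.foldl count_events_mid_step (s, u)
      = ((posts.map (fun p => PySem.Dict.get? (PySem.Dict.mk p) "llm_event_label")
            |>.filterMap count_events_truthy?).foldl PySem.Set.add s,
         u + ((posts.map (fun p => PySem.Dict.get? (PySem.Dict.mk p) "llm_event_label")
            |>.countP (fun o => (count_events_truthy? o).isNone)) : Int)) := by
  induction posts generalizing s u with
  | nil => simp
  | cons p rest ih =>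
    rcases hget : PySem.Dict.get? (PySem.Dict.mk p) "llm_event_label" with _ | l
    · simp only [List.foldl_cons, count_events_mid_step, hget]
      rw [ih]
      simp [count_events_truthy?, hget, Prod.ext_iff]
      omega
    · by_cases hl : l = ""
      · simp only [List.foldl_cons, count_events_mid_step, hget]
        rw [if_neg (by simp [hl]), ih]
        simp [count_events_truthy?, hget, hl, Prod.ext_iff]
        omega
      · simp only [List.foldl_cons, count_events_mid_step, hget]
        rw [if_pos hl, ih]
        simp [count_events_truthy?, hget, hl]

-- scan step over a sorted chain, prev already seen and ≤ every remaining element: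
-- it adds the number of distinct elements other than prev
theorem count_events_scan_some (l : List String) (hl : l.Pairwise (· ≤ ·))
    (c : Int) (p : String) (hp : ∀ x ∈ l, p ≤ x) :
    (l.foldl count_events_scan_step (c, some p)).1 = c + ((l.toFinset.erase p).card : Int) := by
  induction l generalizing c p with
  | nil => simp
  | cons a t ih =>
    rcases List.pairwise_cons.mp hl with ⟨hat, ht⟩
    by_cases hap : a = p
    · subst hap
      have hstep : count_events_scan_step (c, some a) a = (c, some a) := by
        simp [count_events_scan_step]
      rw [List.foldl_cons, hstep, ih ht c a hat]
      simp [Finset.erase_insert_eq_erase]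
    · have hstep : count_events_scan_step (c, some p) a = (c + 1, some a) := by
        simp [count_events_scan_step, hap]
      have hpa : p ≤ a := hp a (List.mem_cons_self)
      have hpnot : p ∉ (a :: t).toFinset := by
        simp only [List.toFinset_cons, Finset.mem_insert, List.mem_toFinset]
        rintro (h | h)
        · exact hap h.symm
        · exact hap (le_antisymm (hat p h) hpa)
      rw [List.foldl_cons, hstep, ih ht (c + 1) a hat,
        Finset.erase_eq_of_notMem hpnot, List.toFinset_cons,
        ← Finset.insert_erase (Finset.mem_insert_self a t.toFinset),
        Finset.erase_insert_eq_erase,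
        Finset.card_insert_of_notMem (Finset.notMem_erase a t.toFinset)]
      push_cast
      ring

-- the full scan from (0, none) over a sorted chain counts the distinct elements
theorem count_events_scan_none (l : List String) (hl : l.Pairwise (· ≤ ·)) :
    (l.foldl count_events_scan_step (0, (none : Option String))).1 = (l.toFinset.card : Int) := by
  cases l with
  | nil => simp
  | cons a t =>
    rcases List.pairwise_cons.mp hl with ⟨hat, ht⟩
    have hstep : count_events_scan_step (0, none) a = (1, some a) := by
      simp [count_events_scan_step]
    rw [List.foldl_cons, hstep, count_events_scan_some t ht 1 a hat, List.toFinset_cons,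
      ← Finset.insert_erase (Finset.mem_insert_self a t.toFinset),
      Finset.erase_insert_eq_erase,
      Finset.card_insert_of_notMem (Finset.notMem_erase a t.toFinset)]
    push_cast
    ring

-- the Set-fold over ts has as many elements as ts has distinct elements
theorem count_events_setfold_card (ts : List String) :
    ((ts.foldl PySem.Set.add ([] : PySem.Set String)).length : Int) = (ts.toFinset.card : Int) := by
  have hofl : ts.foldl PySem.Set.add ([] : PySem.Set String) = PySem.Set.ofList ts :=
    (PySem.Set.ofList_eq_foldl ts).symm
  have hnd : (PySem.Set.ofList ts).Nodup := PySem.Set.nodup_ofList ts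
  have hfin : (PySem.Set.ofList ts).toFinset = ts.toFinset := by
    ext x; simp [PySem.Set.mem_ofList]
  rw [hofl, ← List.toFinset_card_of_nodup hnd, hfin]

-- ===== VERDICT (by name: the statement is the Claim_ definition above) =====
theorem count_events_py_spec : Claim_equal_count_events_py := by
  intro posts _
  unfold Spec_count_events_py count_events_py count_events_py_alt
  show (List.foldl count_events_step (PySem.Set.empty, 0) posts).2
      = (List.foldl count_events_scan_step (0, none)
          (PySem.List.sorted (List.filterMap count_events_truthy?
            (posts.map (fun p => PySem.Dict.get? (PySem.Dict.mk p) "llm_event_label"))) (fun x => x) false)).1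
        + ((posts.map (fun p => PySem.Dict.get? (PySem.Dict.mk p) "llm_event_label")).countP
            (fun o => (count_events_truthy? o).isNone) : Int)
  have h := count_events_fold_inv posts PySem.Set.empty 0
  rw [count_events_mid_char] at h
  simp only [PySem.Set.empty, List.length_nil, Int.natCast_zero, zero_add] at h
  simp only [PySem.Set.empty]
  rw [h, count_events_setfold_card]
  have hscan := count_events_scan_none
    (PySem.List.sorted (List.filterMap count_events_truthy?
      (posts.map (fun p => PySem.Dict.get? (PySem.Dict.mk p) "llm_event_label"))) (fun x => x) false)
    (by simpa using PySem.List.sorted_pairwise (List.filterMap count_events_truthy?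
      (posts.map (fun p => PySem.Dict.get? (PySem.Dict.mk p) "llm_event_label"))) (fun x => x))
  have hperm : (PySem.List.sorted (List.filterMap count_events_truthy?
      (posts.map (fun p => PySem.Dict.get? (PySem.Dict.mk p) "llm_event_label"))) (fun x => x) false).toFinset
      = (List.filterMap count_events_truthy?
      (posts.map (fun p => PySem.Dict.get? (PySem.Dict.mk p) "llm_event_label"))).toFinset := by
    ext x; simp [PySem.List.mem_sorted]
  rw [hperm] at hscan
  rw [hscan]
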